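-- pv_equiv track=rewrite | github.com/Tai-Xinwei/MSAGen | tools/protein_evaluation/PostProcessPredictionResults.py | recover_domseg_from_residx
-- ===== SOURCE A (Python) =====
-- def recover_domseg_from_residx(residx: set):
--     domseg = ' '
--     for i in sorted(residx):
--         if i-1 in residx and i+1 in residx:
--             continue
--         elif i-1 in residx:
--             domseg += f'{i},'
--         elif i+1 in residx:
--             domseg += f'{i}-'
--         else:
--             return ''
--     return domseg.rstrip(',')
-- ===== SOURCE B (Python) =====
-- def recover_domseg_from_residx(residx: set):
--     xs = sorted(residx)
--     runs = []
--     if xs: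
--         start = prev = xs[0]
--         for x in xs[1:]:
--             if x == prev + 1:
--                 prev = x
--             else:
--                 runs.append((start, prev))
--                 start = prev = x
--         runs.append((start, prev))
--     parts = []
--     for a, b in runs:
--         if a == b:
--             return ''
--         parts.append(f'{a}-{b}')
--     return ' ' + ','.join(parts)
-- ===== Notes on version B (the rewrite author's own statement) =====
-- stated objective: alternative
-- what changed: A classifies every sorted element by two set-membership tests (i-1 in set, i+1 in set) while appending to a string and finally rstrips a trailing comma; B instead builds the maximal consecutive runs in one scan over the sorted list (tracking run start and previous value) and then formats the runs, returning '' on any singleton run and joining 'start-end' parts with commas.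
import Mathlib
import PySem

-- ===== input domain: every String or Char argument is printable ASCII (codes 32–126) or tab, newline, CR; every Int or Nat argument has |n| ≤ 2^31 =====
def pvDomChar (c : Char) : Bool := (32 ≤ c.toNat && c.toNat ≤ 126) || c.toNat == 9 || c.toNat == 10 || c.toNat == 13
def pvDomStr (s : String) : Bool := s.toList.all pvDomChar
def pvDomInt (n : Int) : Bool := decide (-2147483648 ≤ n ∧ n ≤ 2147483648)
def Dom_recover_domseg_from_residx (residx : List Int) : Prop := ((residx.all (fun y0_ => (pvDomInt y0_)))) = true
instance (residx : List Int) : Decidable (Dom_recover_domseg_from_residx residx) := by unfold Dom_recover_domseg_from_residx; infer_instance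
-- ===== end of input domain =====

-- B replaces A's per-element set-membership classification by a single run-building scan
-- over the sorted indices followed by a run-formatting pass (objective: alternative).

-- ===== PORT A =====
-- hand port of Python str.rstrip(chars) (PySem has only the two-sided stripChars):
-- drop from the right every char occurring in `chars`; exact on all inputs.
def pvRstripChars (s chars : String) : String :=
  String.ofList ((s.toList.reverse.dropWhile (fun c => chars.toList.contains c)).reverse)

def pvAGo (s : PySem.Set Int) : List Int → String → String
  | [], domseg => pvRstripChars domseg ","
  | i :: rest, domseg =>
    if PySem.Set.contains s (i - 1) && PySem.Set.contains s (i + 1) then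
      pvAGo s rest domseg
    else if PySem.Set.contains s (i - 1) then
      pvAGo s rest (domseg ++ PySem.Int.toStr i ++ ",")
    else if PySem.Set.contains s (i + 1) then
      pvAGo s rest (domseg ++ PySem.Int.toStr i ++ "-")
    else ""

def recover_domseg_from_residx (residx : List Int) : String :=
  pvAGo (PySem.Set.ofList residx)
    (PySem.List.sorted (PySem.Set.ofList residx) (fun x => x) false) " "

-- ===== PORT B =====
def pvRunsGo : List Int → Int → Int → List (Int × Int) → List (Int × Int)
  | [], start, prev, acc => acc ++ [(start, prev)]
  | x :: rest, start, prev, acc =>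
    if x = prev + 1 then pvRunsGo rest start x acc
    else pvRunsGo rest x x (acc ++ [(start, prev)])

def pvPartsGo : List (Int × Int) → List String → String
  | [], parts => " " ++ PySem.Str.join "," parts
  | (a, b) :: rest, parts =>
    if a = b then ""
    else pvPartsGo rest (parts ++ [PySem.Int.toStr a ++ "-" ++ PySem.Int.toStr b])

def recover_domseg_from_residx_alt (residx : List Int) : String :=
  pvPartsGo
    (match PySem.List.sorted (PySem.Set.ofList residx) (fun x => x) false with
      | [] => []
      | x :: rest => pvRunsGo rest x x []) []

-- ===== PRECONDITION & SPEC =====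
def Spec_recover_domseg_from_residx (residx : List Int) (out : String) : Prop := out = recover_domseg_from_residx_alt residx
instance (residx : List Int) (out : String) : Decidable (Spec_recover_domseg_from_residx residx out) := by unfold Spec_recover_domseg_from_residx; infer_instance

-- ===== CLAIM (what is proved, stated in full; the proofs are below) =====
def Claim_equal_recover_domseg_from_residx : Prop := ∀ (residx : List Int), Dom_recover_domseg_from_residx residx → Spec_recover_domseg_from_residx residx (recover_domseg_from_residx residx)

-- ===== LEMMAS AND PROOFS =====

-- The canonical decomposition of a list into maximal runs of consecutive integers.
def specRuns : List Int → List (Int × Int)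
  | [] => []
  | x :: rest =>
    match specRuns rest with
    | [] => [(x, x)]
    | (a, b) :: rs => if a = x + 1 then (x, b) :: rs else (x, x) :: (a, b) :: rs

def mergeF (start prev : Int) : List (Int × Int) → List (Int × Int)
  | [] => [(start, prev)]
  | (a, b) :: rs => if a = prev + 1 then (start, b) :: rs else (start, prev) :: (a, b) :: rs

def fmtRun (p : Int × Int) : String := PySem.Int.toStr p.1 ++ "-" ++ PySem.Int.toStr p.2

def bodyStr : List (Int × Int) → String
  | [] => ""
  | p :: rs => fmtRun p ++ "," ++ bodyStr rs

def hasSing (rs : List (Int × Int)) : Bool := rs.any (fun p => p.1 == p.2)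

-- A's loop with both membership tests replaced by their local characterisations on a
-- strictly increasing list (c = "i-1 is in the set", head test = "i+1 is in the set").
def aGoLocal : List Int → String → Bool → String
  | [], d, _ => pvRstripChars d ","
  | i :: r, d, c =>
    if c && (r.head? == some (i + 1)) then aGoLocal r d (r.head? == some (i + 1))
    else if c then aGoLocal r (d ++ PySem.Int.toStr i ++ ",") (r.head? == some (i + 1))
    else if (r.head? == some (i + 1)) then aGoLocal r (d ++ PySem.Int.toStr i ++ "-") (r.head? == some (i + 1))
    else ""

theorem specRuns_shape : ∀ (xs : List Int) (x : Int),
    ∃ b rs, specRuns (x :: xs) = (x, b) :: rs ∧ x ≤ b := by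
  intro xs
  induction xs with
  | nil => intro x; exact ⟨x, [], rfl, le_refl x⟩
  | cons y ys ih =>
    intro x
    obtain ⟨b, rs, hy, hyb⟩ := ih y
    by_cases hxy : y = x + 1
    · refine ⟨b, rs, ?_, by omega⟩
      rw [specRuns, hy]
      simp [hxy]
    · refine ⟨x, (y, b) :: rs, ?_, le_refl x⟩
      rw [specRuns, hy]
      simp [hxy]

theorem specRuns_cons_next : ∀ (ys : List Int) (x b : Int) (rs : List (Int × Int)),
    specRuns ((x + 1) :: ys) = (x + 1, b) :: rs →
    specRuns (x :: (x + 1) :: ys) = (x, b) :: rs := by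
  intro ys x b rs h
  rw [specRuns, h]
  simp

theorem specRuns_cons_not_next : ∀ (r : List Int) (x : Int),
    r.head? ≠ some (x + 1) → specRuns (x :: r) = (x, x) :: specRuns r := by
  intro r x hr
  cases r with
  | nil => rfl
  | cons y ys =>
    obtain ⟨b, rs, hy, _⟩ := specRuns_shape ys y
    have hyx : y ≠ x + 1 := by intro h; exact hr (by simp [h])
    rw [specRuns, hy]
    simp [hyx]

theorem mergeF_self_eq : ∀ (r : List Int) (x : Int),
    mergeF x x (specRuns r) = specRuns (x :: r) := by
  intro r x
  cases r with
  | nil => rfl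
  | cons y ys =>
    obtain ⟨b, rs, hy, _⟩ := specRuns_shape ys y
    rw [hy]
    conv_rhs => rw [specRuns, hy]
    by_cases hyx : y = x + 1 <;> simp [mergeF, hyx]

theorem pvRunsGo_eq : ∀ (rest : List Int) (start prev : Int) (acc : List (Int × Int)),
    pvRunsGo rest start prev acc = acc ++ mergeF start prev (specRuns rest) := by
  intro rest
  induction rest with
  | nil => intro start prev acc; rfl
  | cons x r ih =>
    intro start prev acc
    rw [pvRunsGo]
    by_cases hx : x = prev + 1
    · rw [if_pos hx, ih]
      congr 1
      cases r with
      | nil => simp [specRuns, mergeF, hx]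
      | cons y ys =>
        obtain ⟨b, rs, hy, _⟩ := specRuns_shape ys y
        by_cases hyx : y = x + 1
        · have hs2 : specRuns (x :: y :: ys) = (x, b) :: rs := by
            subst hyx; exact specRuns_cons_next ys x b rs hy
          rw [hy, hs2]
          have hyx2 : y = prev + 1 + 1 := by omega
          simp [mergeF, hx, hyx2]
        · have hs2 : specRuns (x :: y :: ys) = (x, x) :: (y, b) :: rs := by
            rw [specRuns_cons_not_next (y :: ys) x (by simp [hyx]), hy]
          rw [hy, hs2]
          have hyx2 : ¬ y = prev + 1 + 1 := by omega
          simp [mergeF, hx, hyx2]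
    · rw [if_neg hx, ih, mergeF_self_eq]
      obtain ⟨b, rs, hxr, _⟩ := specRuns_shape r x
      rw [hxr]
      simp [mergeF, hx]

theorem pvPartsGo_eq : ∀ (rs : List (Int × Int)) (parts : List String),
    pvPartsGo rs parts =
      if hasSing rs then "" else " " ++ PySem.Str.join "," (parts ++ rs.map fmtRun) := by
  intro rs
  induction rs with
  | nil => intro parts; simp [pvPartsGo, hasSing]
  | cons p rs ih =>
    obtain ⟨a, b⟩ := p
    intro parts
    by_cases hab : a = b
    · simp [pvPartsGo, hasSing, hab]
    · have h1 : ((a : Int) == b) = false := by simp [hab]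
      rw [pvPartsGo, if_neg hab, ih]
      have h2 : hasSing ((a, b) :: rs) = hasSing rs := by simp [hasSing, h1]
      rw [h2]
      simp [hasSing, fmtRun]

-- strings: bridges
theorem strEq_of_toList (s t : String) (h : s.toList = t.toList) : s = t := String.toList_inj.mp h

theorem strJoin_cons_cons (s t : String) (l : List String) :
    PySem.Str.join "," (s :: t :: l) = s ++ "," ++ PySem.Str.join "," (t :: l) := by
  apply strEq_of_toList
  have hcm : ("," : String).toList = [','] := by decide
  simp [PySem.Str.join, hcm, PySem.Chars.join_cons_cons]

theorem strJoin_singleton (s : String) : PySem.Str.join "," [s] = s := by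
  apply strEq_of_toList
  simp [PySem.Str.join, PySem.Chars.join_singleton]

theorem body_join : ∀ (rs : List (Int × Int)), rs ≠ [] →
    bodyStr rs = PySem.Str.join "," (rs.map fmtRun) ++ "," := by
  intro rs
  induction rs with
  | nil => intro h; exact absurd rfl h
  | cons p rs ih =>
    intro _
    cases rs with
    | nil => simp [bodyStr, strJoin_singleton]
    | cons q rs' =>
      rw [bodyStr, ih (by simp)]
      simp only [List.map_cons]
      rw [strJoin_cons_cons]
      simp [String.append_assoc]

-- str(n) is nonempty and never contains a comma
theorem digitChar_ne_comma : ∀ m : Nat, m < 10 → Nat.digitChar m ≠ ',' := by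
  intro m hm
  interval_cases m <;> decide

theorem toDigitsCore_suffix : ∀ (f n : Nat) (acc : List Char),
    ∃ l, Nat.toDigitsCore 10 f n acc = l ++ acc ∧ (∀ c ∈ l, c ≠ ',') ∧ (f ≠ 0 → l ≠ []) := by
  intro f
  induction f with
  | zero =>
    intro n acc
    exact ⟨[], by rw [Nat.toDigitsCore]; rfl, by simp, by simp⟩
  | succ f ih =>
    intro n acc
    by_cases h : n / 10 = 0
    · refine ⟨[Nat.digitChar (n % 10)], ?_, ?_, by simp⟩
      · rw [Nat.toDigitsCore]; simp [h]
      · simp [digitChar_ne_comma _ (Nat.mod_lt _ (by norm_num))]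
    · obtain ⟨l, hl, hc, _⟩ := ih (n / 10) (Nat.digitChar (n % 10) :: acc)
      refine ⟨l ++ [Nat.digitChar (n % 10)], ?_, ?_, by simp⟩
      · rw [Nat.toDigitsCore]
        simp only [if_neg h]
        rw [hl]
        simp
      · intro c hcmem
        rcases List.mem_append.mp hcmem with h1 | h1
        · exact hc c h1
        · simp only [List.mem_singleton] at h1
          subst h1
          exact digitChar_ne_comma _ (Nat.mod_lt _ (by norm_num))

theorem toDigits_ne_nil_no_comma (n : Nat) :
    Nat.toDigits 10 n ≠ [] ∧ ∀ c ∈ Nat.toDigits 10 n, c ≠ ',' := by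
  obtain ⟨l, hl, hc, hne⟩ := toDigitsCore_suffix (n + 1) n []
  constructor
  · rw [Nat.toDigits, hl, List.append_nil]
    exact hne (by omega)
  · intro c hcm
    rw [Nat.toDigits, hl, List.append_nil] at hcm
    exact hc c hcm

theorem toChars_ne_nil_no_comma (n : Int) :
    PySem.Int.toChars n ≠ [] ∧ ∀ c ∈ PySem.Int.toChars n, c ≠ ',' := by
  unfold PySem.Int.toChars
  split_ifs with h
  · obtain ⟨h1, h2⟩ := toDigits_ne_nil_no_comma n.natAbs
    refine ⟨by simp, ?_⟩
    intro c hc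
    rcases List.mem_cons.mp hc with h3 | h3
    · subst h3; decide
    · exact h2 c h3
  · exact toDigits_ne_nil_no_comma n.toNat

theorem fmtRun_last (p : Int × Int) :
    (fmtRun p).toList ≠ [] ∧ (fmtRun p).toList.getLast? ≠ some ',' := by
  obtain ⟨h1, h2⟩ := toChars_ne_nil_no_comma p.2
  have hdash : ("-" : String).toList = ['-'] := by decide
  have ht : (fmtRun p).toList = (PySem.Int.toStr p.1).toList ++ '-' :: PySem.Int.toChars p.2 := by
    simp [fmtRun, PySem.Int.toList_toStr, hdash]
  constructor
  · rw [ht]; simp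
  · rw [ht, List.getLast?_append_of_ne_nil _ (by simp),
      show ('-' :: PySem.Int.toChars p.2) = ['-'] ++ PySem.Int.toChars p.2 from rfl,
      List.getLast?_append_of_ne_nil _ h1]
    intro hcon
    obtain ⟨l', hl'⟩ := List.getLast?_eq_some_iff.mp hcon
    exact h2 ',' (by rw [hl']; simp) rfl

theorem join_last : ∀ (parts : List (List Char)),
    parts ≠ [] → (∀ p ∈ parts, p ≠ [] ∧ p.getLast? ≠ some ',') →
    PySem.Chars.join [','] parts ≠ [] ∧ (PySem.Chars.join [','] parts).getLast? ≠ some ',' := by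
  intro parts
  induction parts with
  | nil => intro h; exact absurd rfl h
  | cons p parts ih =>
    intro _ hall
    cases parts with
    | nil =>
      rw [PySem.Chars.join_singleton]
      exact hall p (by simp)
    | cons q parts' =>
      obtain ⟨hne, hlast⟩ := ih (by simp) (fun r hr => hall r (List.mem_cons_of_mem _ hr))
      rw [PySem.Chars.join_cons_cons]
      constructor
      · simp
      · rw [List.getLast?_append_of_ne_nil _ hne]
        exact hlast

theorem pvRstrip_append_comma (s : String) (h : s.toList.getLast? ≠ some ',') :
    pvRstripChars (s ++ ",") "," = s := by
  have hcm : (("," : String)).toList = [','] := by decide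
  apply strEq_of_toList
  unfold pvRstripChars
  have h1 : (s ++ ",").toList = s.toList ++ [','] := by simp [hcm]
  rw [h1, List.reverse_append]
  simp only [List.reverse_cons, List.reverse_nil, List.nil_append, List.singleton_append]
  rw [List.dropWhile_cons, if_pos (by simp [hcm])]
  have h3 : List.dropWhile (fun c => (("," : String).toList.contains c)) s.toList.reverse
      = s.toList.reverse := by
    cases hrev : s.toList.reverse with
    | nil => simp
    | cons a l =>
      have ha : a ≠ ',' := by
        intro hc
        apply h
        rw [← List.head?_reverse, hrev]
        simp [hc]
      rw [List.dropWhile_cons, if_neg (by simp [hcm, ha])]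
  rw [h3]
  simp

-- A's loop only depends on the membership function of its set argument
theorem pvAGo_congr (s t : PySem.Set Int)
    (h : ∀ x : Int, PySem.Set.contains s x = PySem.Set.contains t x) :
    ∀ (rest : List Int) (d : String), pvAGo s rest d = pvAGo t rest d := by
  intro rest
  induction rest with
  | nil => intro d; rfl
  | cons i r ih => intro d; simp only [pvAGo, h, ih]

theorem pvAGo_eq_local (S : List Int) (hS : S.Pairwise (· < ·)) :
    ∀ (rest done : List Int) (d : String) (c : Bool), S = done ++ rest →
      (∀ i r, rest = i :: r → c = PySem.Set.contains S (i - 1)) →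
      pvAGo S rest d = aGoLocal rest d c := by
  intro rest
  induction rest with
  | nil => intro done d c _ _; rfl
  | cons i r ih =>
    intro done d c hsplit hc
    have hci : c = PySem.Set.contains S (i - 1) := hc i r rfl
    have hmem : ∀ x : Int, PySem.Set.contains S x = decide (x ∈ S) := by
      intro x; simp [PySem.Set.contains]
    have hpw : (done ++ i :: r).Pairwise (· < ·) := hsplit ▸ hS
    have hparts := List.pairwise_append.mp hpw
    have hdone : ∀ x ∈ done, ∀ y ∈ i :: r, x < y := hparts.2.2
    have hcons := List.pairwise_cons.mp hparts.2.1
    have hir : ∀ y ∈ r, i < y := hcons.1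
    have hnext : PySem.Set.contains S (i + 1) = (r.head? == some (i + 1)) := by
      rw [hmem, hsplit]
      cases r with
      | nil =>
        have hno : ¬ ((i + 1 : Int) ∈ done ++ [i]) := by
          intro hcon
          rcases List.mem_append.mp hcon with h1 | h1
          · have := hdone _ h1 i (by simp); omega
          · simp only [List.mem_singleton] at h1; omega
        simp [hno]
      | cons y ys =>
        have hiy : i < y := hir y (by simp)
        by_cases hy : y = i + 1
        · subst hy
          have hyes : (i + 1 : Int) ∈ done ++ i :: (i + 1) :: ys := by simp
          have hrb : (((i + 1 : Int) :: ys).head? == some (i + 1)) = true := by simp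
          rw [hrb]
          simp [hyes]
        · have hno : ¬ ((i + 1 : Int) ∈ done ++ i :: y :: ys) := by
            intro hcon
            rcases List.mem_append.mp hcon with h1 | h1
            · have := hdone _ h1 i (by simp); omega
            · rcases List.mem_cons.mp h1 with h2 | h2
              · omega
              · rcases List.mem_cons.mp h2 with h3 | h3
                · exact hy h3.symm
                · have h5 := (List.pairwise_cons.mp hcons.2).1 _ h3
                  omega
          have hrb : (((y : Int) :: ys).head? == some (i + 1)) = false := by simp [hy]
          rw [hrb]
          simp [hno]
    have hstep : ∀ y r', r = y :: r' →
        ((r.head? == some (i + 1) : Bool)) = PySem.Set.contains S (y - 1) := by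
      intro y r' hr
      subst hr
      rw [hmem, hsplit]
      have hiy : i < y := hir y (by simp)
      by_cases hy : y = i + 1
      · subst hy
        have hrb : (((i + 1 : Int) :: r').head? == some (i + 1)) = true := by simp
        rw [hrb]
        simp
      · have hno : ¬ ((y - 1 : Int) ∈ done ++ i :: y :: r') := by
          intro hcon
          rcases List.mem_append.mp hcon with h1 | h1
          · have := hdone _ h1 i (by simp); omega
          · rcases List.mem_cons.mp h1 with h2 | h2
            · omega
            · rcases List.mem_cons.mp h2 with h3 | h3
              · omega
              · have h4 := (List.pairwise_cons.mp hcons.2).1 _ h3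
                omega
        have hrb : (((y : Int) :: r').head? == some (i + 1)) = false := by simp [hy]
        rw [hrb]
        simp [hno]
    have hrec : ∀ d', pvAGo S r d' = aGoLocal r d' (r.head? == some (i + 1)) := by
      intro d'
      refine ih (done ++ [i]) d' _ (by rw [hsplit, List.append_assoc]; rfl) ?_
      intro y r' hr
      exact hstep y r' hr
    simp only [pvAGo, aGoLocal]
    rw [← hci, hnext]
    simp only [hrec]

theorem aGoLocal_eq : ∀ (rest : List Int) (d : String),
    (aGoLocal rest d false =
      (if hasSing (specRuns rest) then "" else pvRstripChars (d ++ bodyStr (specRuns rest)) ",")) ∧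
    (∀ x r b rs, rest = x :: r → specRuns rest = (x, b) :: rs →
      aGoLocal rest d true =
        (if hasSing rs then "" else pvRstripChars (d ++ PySem.Int.toStr b ++ "," ++ bodyStr rs) ",")) := by
  intro rest
  induction rest with
  | nil =>
    intro d
    constructor
    · simp [aGoLocal, specRuns, hasSing, bodyStr]
    · intro x r b rs h; cases h
  | cons x r ih =>
    intro d
    constructor
    · -- c = false
      by_cases hh : r.head? = some (x + 1)
      · cases r with
        | nil => simp at hh
        | cons y ys =>
          simp only [List.head?_cons, Option.some.injEq] at hh
          subst hh
          obtain ⟨b, rs, hy, hyb⟩ := specRuns_shape ys (x + 1)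
          have hspec := specRuns_cons_next ys x b rs hy
          have hrb : (((x + 1 : Int) :: ys).head? == some (x + 1)) = true := by simp
          rw [aGoLocal, hrb]
          simp only [Bool.and_true, Bool.false_eq_true, if_false, if_true]
          rw [(ih (d ++ PySem.Int.toStr x ++ "-")).2 (x + 1) ys b rs rfl hy, hspec]
          have hxb : ((x : Int) == b) = false := by simp; omega
          simp only [hasSing, List.any_cons, hxb, Bool.false_or]
          by_cases hs : (rs.any fun p => p.1 == p.2) = true
          · rw [if_pos hs, if_pos hs]
          · rw [if_neg hs, if_neg hs]
            simp only [bodyStr, fmtRun, String.append_assoc]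
      · have hrb : ((r.head? == some (x + 1) : Bool)) = false := by simp [hh]
        rw [aGoLocal, hrb]
        simp only [Bool.and_false, Bool.false_eq_true, if_false]
        rw [specRuns_cons_not_next r x hh]
        simp [hasSing]
    · -- c = true
      intro x' r' b rs heq hspec
      injection heq with h1 h2
      subst h1
      subst h2
      by_cases hh : r.head? = some (x + 1)
      · cases r with
        | nil => simp at hh
        | cons y ys =>
          simp only [List.head?_cons, Option.some.injEq] at hh
          subst hh
          obtain ⟨b', rs', hy, hyb⟩ := specRuns_shape ys (x + 1)
          have hspec' := specRuns_cons_next ys x b' rs' hy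
          rw [hspec'] at hspec
          injection hspec with h3 h5
          injection h3 with h4 h6
          have hrb : (((x + 1 : Int) :: ys).head? == some (x + 1)) = true := by simp
          rw [aGoLocal, hrb]
          simp only [Bool.and_true, if_true]
          rw [(ih d).2 (x + 1) ys b' rs' rfl hy, h6, h5]
      · have hrb : ((r.head? == some (x + 1) : Bool)) = false := by simp [hh]
        have hspec' := specRuns_cons_not_next r x hh
        rw [hspec'] at hspec
        injection hspec with h3 h5
        injection h3 with h4 h6
        rw [aGoLocal, hrb]
        simp only [Bool.and_false, Bool.false_eq_true, if_false, if_true]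
        rw [(ih (d ++ PySem.Int.toStr x ++ ",")).1, h5, h6]

-- ===== VERDICT (by name: the statement is the Claim_ definition above) =====
theorem recover_domseg_from_residx_spec : Claim_equal_recover_domseg_from_residx := by
  unfold Claim_equal_recover_domseg_from_residx Spec_recover_domseg_from_residx
  intro residx _
  unfold recover_domseg_from_residx recover_domseg_from_residx_alt
  have hpair := PySem.List.sorted_ofList_pairwise_lt (κ := Int) residx
  have hcont : ∀ x : Int, PySem.Set.contains (PySem.Set.ofList residx) x
      = PySem.Set.contains (PySem.List.sorted (PySem.Set.ofList residx) (fun x => x) false) x := by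
    intro x
    simp [PySem.Set.contains, PySem.List.mem_sorted]
  rw [pvAGo_congr _ _ hcont]
  cases ht : PySem.List.sorted (PySem.Set.ofList residx) (fun x => x) false with
  | nil =>
    decide
  | cons x rest =>
    have hpair' : (x :: rest).Pairwise (· < ·) := ht ▸ hpair
    have hx1 : PySem.Set.contains (x :: rest) (x - 1) = false := by
      have hxr : ∀ y ∈ rest, x < y := (List.pairwise_cons.mp hpair').1
      have hno : ¬ ((x - 1 : Int) ∈ x :: rest) := by
        intro hmem
        rcases List.mem_cons.mp hmem with h1 | h1
        · omega
        · have := hxr _ h1; omega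
      simp [PySem.Set.contains, hno]
    rw [pvAGo_eq_local (x :: rest) hpair' (x :: rest) [] " " false rfl
      (by intro i r h; injection h with h1 h2; subst h1; exact hx1.symm)]
    rw [(aGoLocal_eq (x :: rest) " ").1]
    show _ = pvPartsGo (pvRunsGo rest x x []) []
    rw [pvRunsGo_eq, List.nil_append, mergeF_self_eq, pvPartsGo_eq]
    obtain ⟨b, rs, hshape, _⟩ := specRuns_shape rest x
    by_cases hs : hasSing (specRuns (x :: rest)) = true
    · rw [if_pos hs, if_pos hs]
    · rw [if_neg hs, if_neg hs, List.nil_append]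
      have hne : specRuns (x :: rest) ≠ [] := by rw [hshape]; simp
      rw [body_join _ hne, ← String.append_assoc]
      apply pvRstrip_append_comma
      have hparts : ∀ p ∈ (specRuns (x :: rest)).map (String.toList ∘ fmtRun),
          p ≠ [] ∧ p.getLast? ≠ some ',' := by
        intro p hp
        obtain ⟨q, _, rfl⟩ := List.mem_map.mp hp
        exact fmtRun_last q
      have hjoin := join_last ((specRuns (x :: rest)).map (String.toList ∘ fmtRun))
        (by rw [hshape]; simp) hparts
      have hsp : (" " : String).toList = [' '] := by decide
      have hcm : ("," : String).toList = [','] := by decide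
      have htl : (" " ++ PySem.Str.join "," ((specRuns (x :: rest)).map fmtRun)).toList
          = [' '] ++ PySem.Chars.join [','] ((specRuns (x :: rest)).map (String.toList ∘ fmtRun)) := by
        simp [hsp, hcm, List.map_map]
      rw [htl, List.getLast?_append_of_ne_nil _ hjoin.1]
      exact hjoin.2
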